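-- pv_equiv track=rewrite | github.com/alxwen711/contestSubmissionArchive | codeforces/Practice/1600/1045i.py | convert
-- ===== SOURCE A (Python) =====
-- def convert(s):
--     h = [0]*26
--     for i in range(len(s)):
--         x = ord(s[i])-97
--         h[x] = (h[x] + 1) % 2
--     """
--     convert to val
--     """
--     ss = 0
--     for snth in range(26):
--         ss += (2**snth)*(h[snth])
--     return ss
-- ===== SOURCE B (Python) =====
-- _POW2 = [1 << i for i in range(26)]
--
-- def convert(s):
--     ss = 0
--     for c in s:
--         ss ^= _POW2[ord(c) - 97]
--     return ss
-- ===== Notes on version B (the rewrite author's own statement) =====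
-- stated objective: simpler
-- what changed: B precomputes the 26 powers of two once and xors _POW2[ord(c)-97] into a single integer accumulator in one pass, dropping A's mutable parity list and its second base-2 summation loop.
import Mathlib
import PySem

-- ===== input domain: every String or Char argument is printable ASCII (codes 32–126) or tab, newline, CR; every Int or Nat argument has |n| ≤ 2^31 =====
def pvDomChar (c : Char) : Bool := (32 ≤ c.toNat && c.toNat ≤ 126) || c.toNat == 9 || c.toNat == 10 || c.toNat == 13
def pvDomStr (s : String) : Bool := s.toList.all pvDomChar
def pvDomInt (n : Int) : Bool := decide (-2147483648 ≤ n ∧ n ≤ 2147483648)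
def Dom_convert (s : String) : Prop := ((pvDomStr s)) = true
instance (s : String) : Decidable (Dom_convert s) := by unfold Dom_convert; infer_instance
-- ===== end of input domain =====

-- B replaces A's 26-slot parity list plus second base-2 summation loop by a module-level
-- table of the 26 powers of two and a single pass xoring _POW2[ord(c)-97] into the
-- accumulator (objective: simpler).

-- ===== PORT A =====
def convert (s : String) : Int :=
  let cs := s.toList
  let h := (PySem.List.pyRange 0 (cs.length : Int) 1).foldl
    (fun h i =>
      let x : Int := ((PySem.List.pyGetD cs i ' ').toNat : Int) - 97
      PySem.List.pySetD h x (PySem.Int.mod (PySem.List.pyGetD h x 0 + 1) 2))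
    (List.replicate 26 (0 : Int))
  (PySem.List.pyRange 0 26 1).foldl
    (fun ss snth => ss + 2 ^ snth.toNat * PySem.List.pyGetD h snth 0) 0

-- ===== PORT B =====
def pow2Table : List Int := (PySem.List.pyRange 0 26 1).map (fun i => (1 : Int) <<< i.toNat)

def convert_alt (s : String) : Int :=
  s.toList.foldl
    (fun ss c => PySem.Int.bxor ss (PySem.List.pyGetD pow2Table ((c.toNat : Int) - 97) 0))
    0

-- ===== PRECONDITION & SPEC =====
-- Pre_ excludes exactly the strings on which A raises IndexError (a character whose
-- code is outside [71,122], so h[ord(c)-97] is out of range even with negative wraparound).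
def Pre_convert (s : String) : Prop := (s.toList.all (fun c => 71 ≤ c.toNat && c.toNat ≤ 122)) = true
instance (s : String) : Decidable (Pre_convert s) := by unfold Pre_convert; infer_instance
def pvWitness_convert : String := "abzGH"

def Spec_convert (s : String) (out : Int) : Prop := out = convert_alt s
instance (s : String) (out : Int) : Decidable (Spec_convert s out) := by unfold Spec_convert; infer_instance

-- ===== CLAIM (what is proved, stated in full; the proofs are below) =====
def Claim_equal_convert : Prop := ∀ (s : String), Dom_convert s → Pre_convert s → Spec_convert s (convert s)

-- ===== LEMMAS AND PROOFS =====

-- A's loop body (proof-local name for the transliterated step)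
def stepA (h : List Int) (c : Char) : List Int :=
  PySem.List.pySetD h ((c.toNat : Int) - 97)
    (PySem.Int.mod (PySem.List.pyGetD h ((c.toNat : Int) - 97) 0 + 1) 2)

-- B's loop body
def stepB (ss : Int) (c : Char) : Int :=
  PySem.Int.bxor ss (PySem.List.pyGetD pow2Table ((c.toNat : Int) - 97) 0)

-- little-endian value of a 0/1 list (the number A's second loop computes)
def lvalN (bs : List Nat) : Nat := bs.foldr (fun b acc => b + 2 * acc) 0

-- bit position of character c, as A's negative-index access resolves it
def kOf (c : Char) : Nat := (c.toNat - 71) % 26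

lemma lvalN_cons (b : Nat) (t : List Nat) : lvalN (b :: t) = b + 2 * lvalN t := rfl

lemma lvalN_append (bs : List Nat) (b : Nat) :
    lvalN (bs ++ [b]) = lvalN bs + 2 ^ bs.length * b := by
  induction bs with
  | nil => simp [lvalN]
  | cons x t ih => simp [lvalN_cons, ih, pow_succ]; ring

lemma xor_cons_step (b x y : Nat) (hb : b ≤ 1) :
    (b + 2 * x) ^^^ (2 * y) = b + 2 * (x ^^^ y) := by
  interval_cases b
  · simpa [Nat.bit_val] using Nat.xor_bit false x false y
  · have h := Nat.xor_bit true x false y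
    rw [Nat.bit_val, Nat.bit_val, Nat.bit_val] at h
    norm_num at h
    rw [Nat.add_comm 1 (2 * x), h]
    omega

-- flipping bit k of a 0/1 list xors 2^k into its value
lemma lvalN_flip (bs : List Nat) (hb : ∀ b ∈ bs, b ≤ 1) :
    ∀ k, k < bs.length →
      lvalN (bs.set k ((bs.getD k 0 + 1) % 2)) = lvalN bs ^^^ 2 ^ k := by
  induction bs with
  | nil => intro k hk; simp at hk
  | cons b t ih =>
    intro k hk
    have hb0 : b ≤ 1 := hb b (List.mem_cons_self ..)
    match k with
    | 0 =>
      interval_cases b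
      · simp only [List.getD_cons_zero, List.set_cons_zero, lvalN_cons, pow_zero]
        rw [Nat.xor_one_of_even ⟨lvalN t, by ring⟩]
        omega
      · simp only [List.getD_cons_zero, List.set_cons_zero, lvalN_cons, pow_zero]
        rw [Nat.xor_one_of_odd ⟨lvalN t, by ring⟩]
        omega
    | k + 1 =>
      have ih' := ih (fun x hx => hb x (List.mem_cons_of_mem _ hx)) k (by simpa using hk)
      simp only [List.set_cons_succ, List.getD_cons_succ, lvalN_cons, ih']
      rw [pow_succ, Nat.mul_comm (2 ^ k) 2, xor_cons_step b (lvalN t) (2 ^ k) hb0]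

-- A's second loop computes lvalN of the (nonnegative) parity list
lemma secondLoop_eq (h : List Int) (hnn : ∀ b ∈ h, 0 ≤ b) :
    (PySem.List.pyRange 0 (h.length : Int) 1).foldl
      (fun ss snth => ss + 2 ^ snth.toNat * PySem.List.pyGetD h snth 0) 0
    = (lvalN (h.map Int.toNat) : Int) := by
  induction h using List.reverseRecOn with
  | nil => simp [lvalN, PySem.List.pyRange_one_eq_nil]
  | append_singleton t b ih =>
    have hlen : ((t ++ [b]).length : Int) = (t.length : Int) + 1 := by simp
    rw [hlen, PySem.List.pyRange_one_succ_right (by positivity), List.foldl_append]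
    have hcongr : (PySem.List.pyRange 0 (t.length : Int) 1).foldl
        (fun ss snth => ss + 2 ^ snth.toNat * PySem.List.pyGetD (t ++ [b]) snth 0) 0
      = (PySem.List.pyRange 0 (t.length : Int) 1).foldl
        (fun ss snth => ss + 2 ^ snth.toNat * PySem.List.pyGetD t snth 0) 0 := by
      apply PySem.List.foldl_congr_mem
      intro acc i hi
      have hi' := (PySem.List.mem_pyRange_one).1 hi
      have hgl : PySem.List.pyGetD (t ++ [b]) i 0 = PySem.List.pyGetD t i 0 := by
        rw [PySem.List.pyGetD_eq_getElem (t ++ [b]) 0 hi'.1 (by simp; omega),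
            PySem.List.pyGetD_eq_getElem t 0 hi'.1 (by exact_mod_cast hi'.2)]
        exact List.getElem_append_left (by omega)
      rw [hgl]
    rw [hcongr, ih (fun x hx => hnn x (List.mem_append_left _ hx))]
    have hlast : PySem.List.pyGetD (t ++ [b]) (t.length : Int) 0 = b := by
      rw [PySem.List.pyGetD_eq_getElem (t ++ [b]) 0 (by positivity) (by simp)]
      simp
    simp only [List.foldl_cons, List.foldl_nil]
    rw [hlast]
    have hbn : b = ((b.toNat : Nat) : Int) := by
      have := hnn b (List.mem_append_right _ (List.mem_singleton_self b)); omega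
    rw [List.map_append, List.map_singleton, lvalN_append]
    push_cast
    rw [Int.toNat_natCast, List.length_map, ← hbn]

-- index resolution: A's access h[ord(c)-97] on a 26-list reads/writes slot kOf c
lemma pyIdx_resolve (c : Char) (hc : 71 ≤ c.toNat ∧ c.toNat ≤ 122) :
    PySem.List.pyIdx? 26 ((c.toNat : Int) - 97) = some (kOf c) := by
  obtain ⟨h1, h2⟩ := hc
  unfold PySem.List.pyIdx? kOf
  by_cases h : (97 : Nat) ≤ c.toNat
  · rw [if_pos (by omega), if_pos (by omega)]
    congr 1
    omega
  · rw [if_neg (by omega), if_pos (by omega)]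
    congr 1
    omega

lemma kOf_lt (c : Char) : kOf c < 26 := Nat.mod_lt _ (by norm_num)

-- the powers table holds 2^k at slot k
lemma pow2Table_at (k : Nat) (hk : k < 26) :
    pow2Table[k]? = some (((2 ^ k : Nat) : Int)) := by
  unfold pow2Table
  rw [show (26 : Int) = ((26 : Nat) : Int) from rfl,
      PySem.List.getElem?_map_pyRange_zero _ 26 k hk]
  norm_num [Int.shiftLeft_natCast_right, Int.shiftLeft_eq]

-- B's table access resolves to the same slot as A's and yields 2^k
lemma pow2_resolve (c : Char) (hc : 71 ≤ c.toNat ∧ c.toNat ≤ 122) :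
    PySem.List.pyGetD pow2Table ((c.toNat : Int) - 97) 0 = (((2 ^ (kOf c) : Nat)) : Int) := by
  have hlen : pow2Table.length = 26 := by decide
  have hidx : PySem.List.pyIdx? pow2Table.length ((c.toNat : Int) - 97) = some (kOf c) := by
    rw [hlen]; exact pyIdx_resolve c hc
  rw [PySem.List.pyGetD, PySem.List.pyGet?, hidx, Option.bind_some,
      pow2Table_at (kOf c) (kOf_lt c), Option.getD_some]

-- the main invariant: B's accumulator tracks lvalN of A's parity list
lemma main_inv (cs : List Char) : ∀ (h : List Int),
    (∀ c ∈ cs, 71 ≤ c.toNat ∧ c.toNat ≤ 122) →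
    h.length = 26 → (∀ b ∈ h, b = 0 ∨ b = 1) →
    cs.foldl stepB ((lvalN (h.map Int.toNat) : Nat) : Int)
    = (lvalN ((cs.foldl stepA h).map Int.toNat) : Int) := by
  induction cs with
  | nil => intro h _ _ _; simp
  | cons c cs ih =>
    intro h hpre hlen hb
    have hc := hpre c (List.mem_cons_self ..)
    have hkl : kOf c < h.length := by have := kOf_lt c; omega
    have hidx : PySem.List.pyIdx? h.length ((c.toNat : Int) - 97) = some (kOf c) := by
      rw [hlen]; exact pyIdx_resolve c hc
    have hget : PySem.List.pyGetD h ((c.toNat : Int) - 97) 0 = h.getD (kOf c) 0 := by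
      simp [PySem.List.pyGetD, PySem.List.pyGet?, hidx, List.getD]
    have hslot : h.getD (kOf c) 0 = 0 ∨ h.getD (kOf c) 0 = 1 := by
      have hm : h.getD (kOf c) 0 ∈ h := by
        rw [List.getD_eq_getElem h 0 hkl]; exact List.getElem_mem hkl
      exact hb _ hm
    set v : Int := PySem.Int.mod (PySem.List.pyGetD h ((c.toNat : Int) - 97) 0 + 1) 2 with hv
    have hset : stepA h c = h.set (kOf c) v := by
      rw [hv]
      simp [stepA, PySem.List.pySetD, PySem.List.pySet?, hidx]
    have hv01 : v = 0 ∨ v = 1 := by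
      rcases hslot with h0 | h0
      · right; rw [hv, hget, h0]; decide
      · left; rw [hv, hget, h0]; decide
    have hmg : (h.map Int.toNat).getD (kOf c) 0 = (h.getD (kOf c) 0).toNat := by
      rw [List.getD_eq_getElem (h.map Int.toNat) 0 (by simpa using hkl),
          List.getD_eq_getElem h 0 hkl, List.getElem_map]
    have hvN : v.toNat = ((h.map Int.toNat).getD (kOf c) 0 + 1) % 2 := by
      rcases hslot with h0 | h0 <;> rw [hmg, hv, hget, h0] <;> decide
    have hble : ∀ b ∈ h.map Int.toNat, b ≤ 1 := by
      intro b hbm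
      obtain ⟨y, hy, rfl⟩ := List.mem_map.1 hbm
      rcases hb y hy with rfl | rfl <;> simp
    have hB : stepB ((lvalN (h.map Int.toNat) : Nat) : Int) c
        = ((lvalN ((h.set (kOf c) v).map Int.toNat) : Nat) : Int) := by
      unfold stepB
      rw [pow2_resolve c hc, PySem.Int.bxor_natCast]
      congr 1
      rw [List.map_set, hvN, lvalN_flip _ hble (kOf c) (by simpa using hkl)]
    simp only [List.foldl_cons, hset, hB]
    exact ih (h.set (kOf c) v)
      (fun d hd => hpre d (List.mem_cons_of_mem _ hd))
      (by simp [hlen])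
      (by intro b hbm
          rcases List.mem_or_eq_of_mem_set hbm with hm | rfl
          · exact hb b hm
          · exact hv01)

-- the parity list A builds keeps length 26 and 0/1 entries
lemma foldA_length_entries (cs : List Char) : ∀ (h : List Int),
    (∀ c ∈ cs, 71 ≤ c.toNat ∧ c.toNat ≤ 122) →
    h.length = 26 → (∀ b ∈ h, b = 0 ∨ b = 1) →
    (cs.foldl stepA h).length = 26 ∧ (∀ b ∈ cs.foldl stepA h, 0 ≤ b) := by
  induction cs with
  | nil => intro h _ hlen hb; exact ⟨hlen, fun b hbm => by rcases hb b hbm with rfl | rfl <;> norm_num⟩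
  | cons c cs ih =>
    intro h hpre hlen hb
    have hc := hpre c (List.mem_cons_self ..)
    have hkl : kOf c < h.length := by have := kOf_lt c; omega
    have hidx : PySem.List.pyIdx? h.length ((c.toNat : Int) - 97) = some (kOf c) := by
      rw [hlen]; exact pyIdx_resolve c hc
    have hget : PySem.List.pyGetD h ((c.toNat : Int) - 97) 0 = h.getD (kOf c) 0 := by
      simp [PySem.List.pyGetD, PySem.List.pyGet?, hidx, List.getD]
    have hslot : h.getD (kOf c) 0 = 0 ∨ h.getD (kOf c) 0 = 1 := by
      have hm : h.getD (kOf c) 0 ∈ h := by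
        rw [List.getD_eq_getElem h 0 hkl]; exact List.getElem_mem hkl
      exact hb _ hm
    set v : Int := PySem.Int.mod (PySem.List.pyGetD h ((c.toNat : Int) - 97) 0 + 1) 2 with hv
    have hset : stepA h c = h.set (kOf c) v := by
      rw [hv]
      simp [stepA, PySem.List.pySetD, PySem.List.pySet?, hidx]
    have hv01 : v = 0 ∨ v = 1 := by
      rcases hslot with h0 | h0
      · right; rw [hv, hget, h0]; decide
      · left; rw [hv, hget, h0]; decide
    simp only [List.foldl_cons, hset]
    exact ih (h.set (kOf c) v)
      (fun d hd => hpre d (List.mem_cons_of_mem _ hd))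
      (by simp [hlen])
      (by intro b hbm
          rcases List.mem_or_eq_of_mem_set hbm with hm | rfl
          · exact hb b hm
          · exact hv01)

-- ===== VERDICT (by name: the statement is the Claim_ definition above) =====
set_option maxRecDepth 4096 in
theorem convert_spec : Claim_equal_convert := by
  intro s _ hpre
  show convert s = convert_alt s
  have hpre' : ∀ c ∈ s.toList, 71 ≤ c.toNat ∧ c.toNat ≤ 122 := by
    intro c hc
    have h := List.all_eq_true.1 hpre c hc
    simpa using h
  have h0len : (List.replicate 26 (0 : Int)).length = 26 := by simp
  have h0b : ∀ b ∈ List.replicate 26 (0 : Int), b = 0 ∨ b = 1 := by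
    intro b hbm; left; exact (List.eq_of_mem_replicate hbm)
  unfold convert convert_alt
  change (PySem.List.pyRange 0 26 1).foldl
      (fun ss snth => ss + 2 ^ snth.toNat *
        PySem.List.pyGetD
          ((PySem.List.pyRange 0 (s.toList.length : Int) 1).foldl
            (fun h i => stepA h (PySem.List.pyGetD s.toList i ' '))
            (List.replicate 26 (0 : Int))) snth 0) 0
    = s.toList.foldl stepB 0
  rw [PySem.List.foldl_pyRange_zero_pyGetD' s.toList ' ' stepA (List.replicate 26 (0 : Int))]
  obtain ⟨hflen, hfnn⟩ := foldA_length_entries s.toList _ hpre' h0len h0b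
  rw [show (26 : Int) = ((s.toList.foldl stepA (List.replicate 26 (0 : Int))).length : Int)
        by exact_mod_cast hflen.symm]
  rw [secondLoop_eq _ hfnn]
  rw [← main_inv s.toList _ hpre' h0len h0b]
  rw [show ((lvalN ((List.replicate 26 (0 : Int)).map Int.toNat) : Nat) : Int) = 0 from by
        simp [lvalN]]
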